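-- pv_equiv track=rewrite | github.com/Ruanpiscitelli/media-api2 | src/core/gpu_manager.py | _identify_workflow_type
-- ===== SOURCE A (Python) =====
-- def _identify_workflow_type(workflow: dict) -> str:
--     """Identifica o tipo do workflow baseado nos nós presentes"""
--     nodes = workflow.get('nodes', [])
--     node_types = {node.get('class_type', '').lower() for node in nodes}
--
--     if any('video' in nt for nt in node_types):
--         return 'video'
--     elif any('audio' in nt for nt in node_types):
--         return 'audio'
--     elif any('upscale' in nt for nt in node_types):
--         return 'upscale'
--     elif any('inpaint' in nt for nt in node_types):
--         return 'inpainting'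
--     elif any('img2img' in nt for nt in node_types):
--         return 'img2img'
--     elif any('txt2img' in nt for nt in node_types):
--         return 'txt2img'
--     return 'unknown'
-- ===== SOURCE B (Python) =====
-- def _identify_workflow_type(workflow: dict) -> str:
--     """Single pass over the nodes collecting six boolean flags, then one priority chain."""
--     has_video = has_audio = has_upscale = has_inpaint = has_img2img = has_txt2img = False
--     for node in workflow.get('nodes', []):
--         ct = node.get('class_type', '').lower()
--         has_video = has_video or 'video' in ct
--         has_audio = has_audio or 'audio' in ct
--         has_upscale = has_upscale or 'upscale' in ct
--         has_inpaint = has_inpaint or 'inpaint' in ct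
--         has_img2img = has_img2img or 'img2img' in ct
--         has_txt2img = has_txt2img or 'txt2img' in ct
--     if has_video:
--         return 'video'
--     if has_audio:
--         return 'audio'
--     if has_upscale:
--         return 'upscale'
--     if has_inpaint:
--         return 'inpainting'
--     if has_img2img:
--         return 'img2img'
--     if has_txt2img:
--         return 'txt2img'
--     return 'unknown'
-- ===== Notes on version B (the rewrite author's own statement) =====
-- stated objective: alternative
-- what changed: Replaces building a set of lowered class types and scanning it up to six times with a single pass over the nodes that ORs six boolean flags, followed by one priority chain on the flags.
import Mathlib
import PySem

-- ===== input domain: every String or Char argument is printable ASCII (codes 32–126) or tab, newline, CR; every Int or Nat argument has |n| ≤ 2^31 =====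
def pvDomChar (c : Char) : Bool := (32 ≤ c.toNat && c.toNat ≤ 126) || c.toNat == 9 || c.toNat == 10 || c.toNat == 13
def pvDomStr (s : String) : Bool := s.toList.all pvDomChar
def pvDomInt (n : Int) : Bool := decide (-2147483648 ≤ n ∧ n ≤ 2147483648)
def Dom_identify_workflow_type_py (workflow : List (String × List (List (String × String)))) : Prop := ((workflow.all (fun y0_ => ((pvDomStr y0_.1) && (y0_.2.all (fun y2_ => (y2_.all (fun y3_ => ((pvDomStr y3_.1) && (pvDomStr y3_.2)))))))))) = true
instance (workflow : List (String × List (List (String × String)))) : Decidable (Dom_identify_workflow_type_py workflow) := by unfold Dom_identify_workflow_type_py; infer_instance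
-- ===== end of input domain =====

-- B changes the algorithm: one pass over the nodes ORing six flags instead of building a
-- set of lowered class types and scanning it up to six times (objective: alternative decomposition).

-- ===== PORT A =====
def identify_workflow_type_py (workflow : List (String × List (List (String × String)))) : String :=
  let nodes := PySem.Dict.getD (PySem.Dict.mk workflow) "nodes" []
  let node_types : PySem.Set String :=
    PySem.Set.ofList (nodes.map (fun node => PySem.Str.lower (PySem.Dict.getD (PySem.Dict.mk node) "class_type" "")))
  if node_types.any (fun nt => PySem.Str.isIn "video" nt) then "video"
  else if node_types.any (fun nt => PySem.Str.isIn "audio" nt) then "audio"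
  else if node_types.any (fun nt => PySem.Str.isIn "upscale" nt) then "upscale"
  else if node_types.any (fun nt => PySem.Str.isIn "inpaint" nt) then "inpainting"
  else if node_types.any (fun nt => PySem.Str.isIn "img2img" nt) then "img2img"
  else if node_types.any (fun nt => PySem.Str.isIn "txt2img" nt) then "txt2img"
  else "unknown"

-- ===== PORT B =====
def identify_workflow_type_py_alt (workflow : List (String × List (List (String × String)))) : String :=
  let flags :=
    (PySem.Dict.getD (PySem.Dict.mk workflow) "nodes" []).foldl
      (fun (f : Bool × Bool × Bool × Bool × Bool × Bool) node =>
        let ct := PySem.Str.lower (PySem.Dict.getD (PySem.Dict.mk node) "class_type" "")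
        (f.1 || PySem.Str.isIn "video" ct,
         f.2.1 || PySem.Str.isIn "audio" ct,
         f.2.2.1 || PySem.Str.isIn "upscale" ct,
         f.2.2.2.1 || PySem.Str.isIn "inpaint" ct,
         f.2.2.2.2.1 || PySem.Str.isIn "img2img" ct,
         f.2.2.2.2.2 || PySem.Str.isIn "txt2img" ct))
      (false, false, false, false, false, false)
  if flags.1 then "video"
  else if flags.2.1 then "audio"
  else if flags.2.2.1 then "upscale"
  else if flags.2.2.2.1 then "inpainting"
  else if flags.2.2.2.2.1 then "img2img"
  else if flags.2.2.2.2.2 then "txt2img"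
  else "unknown"

-- ===== PRECONDITION & SPEC =====
def Spec_identify_workflow_type_py (workflow : List (String × List (List (String × String)))) (out : String) : Prop := out = identify_workflow_type_py_alt workflow
instance (workflow : List (String × List (List (String × String)))) (out : String) : Decidable (Spec_identify_workflow_type_py workflow out) := by unfold Spec_identify_workflow_type_py; infer_instance

-- ===== CLAIM (what is proved, stated in full; the proofs are below) =====
def Claim_equal_identify_workflow_type_py : Prop := ∀ (workflow : List (String × List (List (String × String)))), Dom_identify_workflow_type_py workflow → Spec_identify_workflow_type_py workflow (identify_workflow_type_py workflow)

-- ===== LEMMAS AND PROOFS =====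

-- dedup does not change `any` (same elements)
theorem any_ofList {α : Type} [BEq α] [LawfulBEq α] (xs : List α) (p : α → Bool) :
    (PySem.Set.ofList xs).any p = xs.any p := by
  rw [Bool.eq_iff_iff]
  simp only [List.any_eq_true, PySem.Set.mem_ofList]

-- the one-pass fold computes the six `any`s at once
theorem flags_foldl (nodes : List (List (String × String)))
    (p1 p2 p3 p4 p5 p6 : List (String × String) → Bool) :
    ∀ (a : Bool × Bool × Bool × Bool × Bool × Bool),
    nodes.foldl (fun (f : Bool × Bool × Bool × Bool × Bool × Bool) node =>
        (f.1 || p1 node, f.2.1 || p2 node, f.2.2.1 || p3 node,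
         f.2.2.2.1 || p4 node, f.2.2.2.2.1 || p5 node, f.2.2.2.2.2 || p6 node)) a
    = (a.1 || nodes.any p1, a.2.1 || nodes.any p2, a.2.2.1 || nodes.any p3,
       a.2.2.2.1 || nodes.any p4, a.2.2.2.2.1 || nodes.any p5, a.2.2.2.2.2 || nodes.any p6) := by
  induction nodes with
  | nil => intro a; simp
  | cons n ns ih =>
    intro a
    simp [List.foldl_cons, ih, Bool.or_assoc]

-- ===== VERDICT (by name: the statement is the Claim_ definition above) =====
theorem identify_workflow_type_py_spec : Claim_equal_identify_workflow_type_py := by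
  intro workflow _
  unfold Spec_identify_workflow_type_py identify_workflow_type_py identify_workflow_type_py_alt
  simp only [flags_foldl, any_ofList, List.any_map, Bool.false_or, Function.comp_def]
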